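-- pv_equiv track=rewrite | github.com/miliar/Code_Jam_Webscraper | solutions_python/solutions_year16_round0_nr4/1334.py | solve
-- ===== SOURCE A (Python) =====
-- def solve(rem, h, k):
--     if len(rem) == 0:
--         return 0
--     if h == 1:
--         return rem[0]
--     if len(rem) == 1:
--         return rem[0] + k*(solve(rem,h-1, k)-1)
--     return rem[-1] + k*(solve(rem[:-1], h-1, k)-1)
-- ===== SOURCE B (Python) =====
-- # B: iterative single pass with an index/suffix loop instead of recursive tail
-- # slicing, and a closed form (geometric series) for the length-1 phase.
-- def solve(rem, h, k):
--     if not rem: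
--         return 0
--     n = len(rem)
--     if h > n:
--         # length-1 phase of height h-n+1, collapsed to a closed form
--         m = h - n
--         if k == 1:
--             g = rem[0] + m * (rem[0] - 1)
--         else:
--             p = k ** m
--             g = p * rem[0] + (rem[0] - k) * (p - 1) // (k - 1)
--         tail = rem[1:]
--     else:
--         g = rem[0]
--         tail = rem[n - h + 1:]
--     for x in tail:
--         g = x + k * (g - 1)
--     return g
-- ===== Notes on version B (the rewrite author's own statement) =====
-- stated objective: faster
-- what changed: Replaces A's O(h) recursion with repeated list slicing by one iterative pass over a single list suffix plus a closed-form geometric-series formula for the repeated length-1 step, so no recursion and no per-step copies.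
-- outside the precondition, e.g. on solve([2], 9500, 1): A returns 9501, B returns 9501
import Mathlib
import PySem

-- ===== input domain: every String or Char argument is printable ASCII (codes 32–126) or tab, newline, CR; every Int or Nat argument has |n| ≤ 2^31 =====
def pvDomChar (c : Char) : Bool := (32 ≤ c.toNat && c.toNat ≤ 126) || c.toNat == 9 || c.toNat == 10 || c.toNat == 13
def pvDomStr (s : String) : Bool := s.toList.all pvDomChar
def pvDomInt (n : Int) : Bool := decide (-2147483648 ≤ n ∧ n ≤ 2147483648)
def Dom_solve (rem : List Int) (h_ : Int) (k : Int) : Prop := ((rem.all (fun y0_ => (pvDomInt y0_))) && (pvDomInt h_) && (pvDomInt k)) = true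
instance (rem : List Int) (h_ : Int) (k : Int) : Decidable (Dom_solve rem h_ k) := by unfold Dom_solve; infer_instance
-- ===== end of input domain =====

-- B replaces A's O(h)-deep recursion with repeated tail slicing by a single
-- iterative pass over one suffix plus a closed-form geometric series for the
-- length-1 phase (objective: faster).


-- ===== PORT A =====
-- Literal port of A's recursion; the recursion is on the height, so the fuel
-- is h_.toNat (the `0` fuel case is unreachable under Pre_solve: there Python
-- recurses without bound).  rem[0] = headD (guarded by rem ≠ []),
-- rem[-1] = getLastD, rem[:-1] = dropLast (exact for a nonempty list).
def solveGo (rem : List Int) (h : Nat) (k : Int) : Int :=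
  if rem = [] then 0
  else if h = 1 then rem.headD 0
  else
    match h with
    | 0 => 0          -- totalizing fuel base; Python diverges here (h_ ≤ 0)
    | h' + 1 =>
      if rem.length = 1 then rem.headD 0 + k * (solveGo rem h' k - 1)
      else rem.getLastD 0 + k * (solveGo rem.dropLast h' k - 1)

def solve (rem : List Int) (h_ : Int) (k : Int) : Int :=
  solveGo rem h_.toNat k

-- ===== PORT B =====
def solve_alt (rem : List Int) (h_ : Int) (k : Int) : Int :=
  match rem with
  | [] => 0
  | r0 :: rest =>
    let n : Int := (rem.length : Int)
    let gt : Int × List Int :=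
      if h_ > n then
        let m := h_ - n
        let g := if k = 1 then r0 + m * (r0 - 1)
                 else
                   let p := k ^ m.toNat            -- k ** m, m ≥ 1 here
                   p * r0 + PySem.Int.floordiv ((r0 - k) * (p - 1)) (k - 1)
        (g, rest)                                   -- rem[1:]
      else
        (r0, rem.drop (n - h_ + 1).toNat)           -- rem[n-h+1:], index ≥ 1 here
    gt.2.foldl (fun g x => x + k * (g - 1)) gt.1

-- ===== PRECONDITION & SPEC =====
-- Pre_ excludes nonempty rem with h_ ≤ 0 (A recurses forever: RecursionError)
-- and with h_ > 9000 (A's recursion depth ≈ h_ exceeds the interpreter's stack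
-- even though for moderate h_ above 9000 it would still return — that thin
-- band is the only narrowing, see the cite in the claim).
def Pre_solve (rem : List Int) (h_ : Int) (k : Int) : Prop :=
  rem = [] ∨ (1 ≤ h_ ∧ h_ ≤ 9000)
instance (rem : List Int) (h_ : Int) (k : Int) : Decidable (Pre_solve rem h_ k) := by
  unfold Pre_solve; infer_instance

def pvWitness_solve : List Int × Int × Int := ([3, 5], 2, 2)

def Spec_solve (rem : List Int) (h_ : Int) (k : Int) (out : Int) : Prop := out = solve_alt rem h_ k
instance (rem : List Int) (h_ : Int) (k : Int) (out : Int) : Decidable (Spec_solve rem h_ k out) := by unfold Spec_solve; infer_instance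

-- ===== CLAIM (what is proved, stated in full; the proofs are below) =====
def Claim_equal_solve : Prop := ∀ (rem : List Int) (h_ : Int) (k : Int), Dom_solve rem h_ k → Pre_solve rem h_ k → Spec_solve rem h_ k (solve rem h_ k)

-- ===== LEMMAS AND PROOFS =====

-- geometric series Σ_{i<m} k^i, by the recurrence B's closed form rests on
def sgeo (k : Int) : Nat → Int
  | 0 => 0
  | m + 1 => sgeo k m * k + 1

-- the value of the length-1 phase of height m+1, as a function of m
def cf (a k : Int) (m : Nat) : Int :=
  if k = 1 then a + m * (a - 1) else k ^ m * a + (a - k) * sgeo k m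

theorem pow_sub_one_eq (k : Int) (m : Nat) : k ^ m - 1 = (k - 1) * sgeo k m := by
  induction m with
  | zero => simp [sgeo]
  | succ m ih =>
    have : k ^ (m + 1) - 1 = k * (k ^ m - 1) + (k - 1) := by ring
    rw [this, ih, sgeo]; ring

theorem cf_succ (a k : Int) (m : Nat) : cf a k (m + 1) = a + k * (cf a k m - 1) := by
  unfold cf
  split_ifs with hk
  · subst hk; push_cast; ring
  · rw [sgeo]; ring

theorem solveGo_single (a k : Int) (m : Nat) : solveGo [a] (m + 1) k = cf a k m := by
  induction m with
  | zero => simp [solveGo, cf, sgeo]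
  | succ m ih =>
    rw [solveGo]
    simp only [List.headD, List.length, reduceCtorEq, if_false]
    have h1 : m + 1 + 1 ≠ 1 := by omega
    simp only [h1, if_false, if_true, ih, cf_succ]

theorem alt_single (a k : Int) (m : Nat) : solve_alt [a] ((m : Int) + 1) k = cf a k m := by
  unfold solve_alt
  simp only [List.length_cons, List.length_nil]
  split_ifs with hgt hk
  · simp [List.foldl, cf, hk]
  · have hk1 : k - 1 ≠ 0 := by omega
    have hE : ((m : Int) + 1 - (((0:Nat)+1 : Nat) : Int)).toNat = m := by push_cast at hgt ⊢; omega
    simp only [List.foldl, hE]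
    rw [pow_sub_one_eq]
    have h2 : (a - k) * ((k - 1) * sgeo k m) = ((a - k) * sgeo k m) * (k - 1) := by ring
    rw [h2]
    simp [PySem.Int.floordiv, Int.mul_fdiv_cancel _ hk1, cf, hk]
  · -- h = m+1 ≤ 1, so m = 0: tail = drop 1 [a] = [], g = a
    have hm0 : m = 0 := by push_cast at hgt; omega
    subst hm0
    norm_num [cf, sgeo]

theorem foldl_step_concat (k g x : Int) (t : List Int) :
    (t ++ [x]).foldl (fun g y => y + k * (g - 1)) g
      = x + k * (t.foldl (fun g y => y + k * (g - 1)) g - 1) := by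
  simp [List.foldl_append]

theorem alt_concat (ys : List Int) (x k : Int) (h : Nat) (hys : ys ≠ []) (hh : 2 ≤ h) :
    solve_alt (ys ++ [x]) (h : Int) k = x + k * (solve_alt ys ((h : Int) - 1) k - 1) := by
  match ys, hys with
  | y :: ys', _ =>
  unfold solve_alt
  simp only [List.cons_append, List.length_cons, List.length_append, List.length_nil]
  by_cases hgt : ((ys'.length : Int) + 2) < (h : Int)
  · have cl : (h : Int) > ((ys'.length + (0 + 1) + 1 : Nat) : Int) := by push_cast; omega
    have cr : (h : Int) - 1 > ((ys'.length + 1 : Nat) : Int) := by push_cast; omega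
    rw [if_pos cl, if_pos cr]
    push_cast
    have hm : (h : Int) - ((ys'.length : Int) + 1 + 1) = (h : Int) - 1 - ((ys'.length : Int) + 1) := by ring
    rw [hm, foldl_step_concat]
  · have cl : ¬ ((h : Int) > ((ys'.length + (0 + 1) + 1 : Nat) : Int)) := by push_cast; omega
    have cr : ¬ ((h : Int) - 1 > ((ys'.length + 1 : Nat) : Int)) := by push_cast; omega
    rw [if_neg cl, if_neg cr]
    have hcons : y :: (ys' ++ [x]) = (y :: ys') ++ [x] := by simp
    rw [hcons]
    have hle : ((((ys'.length + (0 + 1) + 1 : Nat)) : Int) - (h : Int) + 1).toNat ≤ (y :: ys').length := by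
      simp only [List.length_cons]; omega
    rw [List.drop_append_of_le_length hle, foldl_step_concat]
    have hj : ((((ys'.length + (0 + 1) + 1 : Nat)) : Int) - (h : Int) + 1).toNat
        = ((((ys'.length + 1 : Nat)) : Int) - ((h : Int) - 1) + 1).toNat := by push_cast; omega
    rw [hj]


theorem alt_one (rem : List Int) (k : Int) (hrem : rem ≠ []) :
    solve_alt rem (1 : Int) k = rem.headD 0 := by
  match rem, hrem with
  | y :: rest, _ =>
  unfold solve_alt
  simp only [List.length_cons]
  have hng : ¬ ((1 : Int) > ((rest.length + 1 : Nat) : Int)) := by push_cast; omega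
  rw [if_neg hng]
  have hd : (((rest.length + 1 : Nat) : Int) - 1 + 1).toNat = rest.length + 1 := by omega
  simp [List.drop_length]

-- MAIN: the two computations agree for every nonempty rem and every height ≥ 1
theorem main_lemma (k : Int) (h : Nat) (rem : List Int) (hrem : rem ≠ []) (hh : 1 ≤ h) :
    solveGo rem h k = solve_alt rem (h : Int) k := by
  induction h generalizing rem with
  | zero => omega
  | succ h ih =>
    rcases List.eq_nil_or_concat rem with hnil | ⟨ys, x, hconcat⟩
    · exact absurd hnil hrem
    · subst hconcat
      simp only [List.concat_eq_append]
      by_cases hys : ys = []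
      · subst hys
        simp only [List.nil_append]
        rw [solveGo_single]
        rw [show ((h + 1 : Nat) : Int) = (h : Int) + 1 by push_cast; ring]
        exact (alt_single x k h).symm
      · by_cases hh1 : h = 0
        · subst hh1
          rw [show ((0 + 1 : Nat) : Int) = (1 : Int) by norm_num,
              alt_one (ys ++ [x]) k (by simp)]
          rw [solveGo]
          simp
        · have hne : ys ++ [x] ≠ [] := by simp
          have hlen : (ys ++ [x]).length ≠ 1 := by
            simp only [List.length_append, List.length_cons, List.length_nil]
            cases ys with
            | nil => exact absurd rfl hys
            | cons a t => simp
          rw [show ((h + 1 : Nat) : Int) = ((h + 1 : Nat) : Int) from rfl,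
              alt_concat ys x k (h + 1) hys (by omega)]
          rw [solveGo]
          rw [if_neg hne, if_neg (by omega : ¬ h + 1 = 1)]
          simp only [hlen, if_false]
          rw [List.dropLast_concat, List.getLastD_concat]
          rw [ih ys hys (by omega)]
          rw [show ((h + 1 : Nat) : Int) - 1 = (h : Nat) by push_cast; ring]

-- ===== VERDICT (by name: the statement is the Claim_ definition above) =====
theorem solve_spec : Claim_equal_solve := by
  intro rem h_ k _ hpre
  unfold Spec_solve
  rcases hpre with hnil | ⟨h1, _⟩
  · subst hnil; unfold solve solveGo solve_alt; simp
  · by_cases hrem : rem = []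
    · subst hrem; unfold solve solveGo solve_alt; simp
    · have hto : ((h_.toNat : Nat) : Int) = h_ := by omega
      have := main_lemma k h_.toNat rem hrem (by omega)
      rw [solve, this, hto]
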